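-- pv_equiv track=rewrite | github.com/probabilistic-minds-consortium/void-theory | neural/void_predictive_network.py | accumulate_fin
-- ===== SOURCE A (Python) =====
-- def accumulate_fin(inputs_active, weights, budget):
--     """Sum weights where input is active. Pure Fin addition.
--     Cost: 1 tick per active input (fixed), not proportional to weight."""
--     acc = 0
--     for active, w in zip(inputs_active, weights):
--         if active:
--             if budget <= 0: return (acc, 0)
--             budget -= 1  # fixed cost per input, not per weight unit
--             acc += w     # structural: Fin value, no loop needed for same-den
--     return (acc, budget)
-- ===== SOURCE B (Python) =====
-- def accumulate_fin(inputs_active, weights, budget):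
--     aw = [w for a, w in zip(inputs_active, weights) if a]
--     k = min(max(budget, 0), len(aw))  # can afford at most k of the active inputs
--     # processed them all -> leftover budget; ran out part-way -> nothing left
--     return (sum(aw[:k]), budget - len(aw) if k == len(aw) else 0)
-- ===== Notes on version B (the rewrite author's own statement) =====
-- stated objective: alternative
-- what changed: Replaces the interleaved budget-decrement loop with early return by a filter pass collecting active weights, an arithmetic cap k = min(max(budget,0), len), a prefix-sum, and an arithmetic remainder.
import Mathlib
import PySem

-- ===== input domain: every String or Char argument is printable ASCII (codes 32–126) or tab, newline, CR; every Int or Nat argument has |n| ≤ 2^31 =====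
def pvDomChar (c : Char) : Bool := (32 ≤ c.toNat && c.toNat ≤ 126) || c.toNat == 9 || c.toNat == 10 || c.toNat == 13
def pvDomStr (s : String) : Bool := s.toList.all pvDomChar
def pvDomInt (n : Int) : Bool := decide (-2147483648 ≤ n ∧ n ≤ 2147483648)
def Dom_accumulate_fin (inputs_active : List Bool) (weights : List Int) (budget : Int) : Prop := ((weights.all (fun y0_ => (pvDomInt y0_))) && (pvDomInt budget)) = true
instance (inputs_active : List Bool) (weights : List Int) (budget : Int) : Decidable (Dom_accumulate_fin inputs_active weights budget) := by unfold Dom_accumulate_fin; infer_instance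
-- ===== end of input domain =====

-- B replaces A's interleaved budget-decrement loop (early return) by a filter pass plus an arithmetic cap, prefix-sum and remainder; alternative decomposition, same cost.


-- ===== PORT A =====
-- loop over zip(inputs_active, weights) carrying (acc, budget), with the early return
def accumulateFinGo : List (Bool × Int) → Int → Int → Int × Int
  | [], acc, budget => (acc, budget)
  | (active, w) :: rest, acc, budget =>
    if active then
      if budget ≤ 0 then (acc, 0)
      else accumulateFinGo rest (acc + w) (budget - 1)
    else accumulateFinGo rest acc budget

def accumulate_fin (inputs_active : List Bool) (weights : List Int) (budget : Int) : Int × Int :=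
  accumulateFinGo (List.zip inputs_active weights) 0 budget

-- ===== PORT B =====
def accumulate_fin_alt (inputs_active : List Bool) (weights : List Int) (budget : Int) : Int × Int :=
  let aw := ((List.zip inputs_active weights).filter (fun p => p.1)).map Prod.snd
  let k : Int := min (max budget 0) (aw.length : Int)
  ((aw.take k.toNat).sum, if k = (aw.length : Int) then budget - aw.length else 0)

-- ===== PRECONDITION & SPEC =====
def Spec_accumulate_fin (inputs_active : List Bool) (weights : List Int) (budget : Int) (out : Int × Int) : Prop := out = accumulate_fin_alt inputs_active weights budget
instance (inputs_active : List Bool) (weights : List Int) (budget : Int) (out : Int × Int) : Decidable (Spec_accumulate_fin inputs_active weights budget out) := by unfold Spec_accumulate_fin; infer_instance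

-- ===== CLAIM (what is proved, stated in full; the proofs are below) =====
def Claim_equal_accumulate_fin : Prop := ∀ (inputs_active : List Bool) (weights : List Int) (budget : Int), Dom_accumulate_fin inputs_active weights budget → Spec_accumulate_fin inputs_active weights budget (accumulate_fin inputs_active weights budget)

-- ===== LEMMAS AND PROOFS =====
-- loop invariant: the A-loop on any pair list equals B's closed form, with acc an offset
theorem accumulateFinGo_closed (l : List (Bool × Int)) :
    ∀ (acc budget : Int),
      accumulateFinGo l acc budget =
        (let aw := (l.filter (fun p => p.1)).map Prod.snd
         let k : Int := min (max budget 0) (aw.length : Int)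
         (acc + (aw.take k.toNat).sum, if k = (aw.length : Int) then budget - aw.length else 0)) := by
  induction l with
  | nil =>
    intro acc budget
    simp [accumulateFinGo]
  | cons hd tl ih =>
    intro acc budget
    obtain ⟨active, w⟩ := hd
    by_cases ha : active
    · simp only [accumulateFinGo, ha, if_true, List.filter_cons, List.map_cons]
      set aw := (tl.filter (fun p => p.1)).map Prod.snd with haw
      have hn0 : (0:Int) ≤ (aw.length : Int) := Int.natCast_nonneg _
      by_cases hb : budget ≤ 0
      · simp only [hb, if_true, List.length_cons]
        have hk : min (max budget 0) (((aw.length : Int)) + 1) = 0 := by omega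
        push_cast
        rw [hk]
        have hne : ¬ ((0:Int) = (aw.length : Int) + 1) := by omega
        simp [hne]
      · simp only [hb, if_false]
        rw [ih (acc + w) (budget - 1)]
        simp only [List.length_cons]
        push_cast
        set k' : Int := min (max (budget - 1) 0) ((aw.length : Int)) with hk'
        set k : Int := min (max budget 0) ((aw.length : Int) + 1) with hk
        have hkk : k = k' + 1 := by omega
        have htake : (w :: aw).take k.toNat = w :: aw.take k'.toNat := by
          have : k.toNat = k'.toNat + 1 := by omega
          rw [this, List.take_succ_cons]
        rw [htake]
        have hiff : (k = (aw.length : Int) + 1) ↔ (k' = (aw.length : Int)) := by omega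
        rw [Prod.mk.injEq]
        constructor
        · simp [List.sum_cons]; ring
        · by_cases hc : k' = (aw.length : Int)
          · rw [if_pos (hiff.mpr hc), if_pos hc]; ring
          · rw [if_neg (fun h => hc (hiff.mp h)), if_neg hc]
    · have ha' : active = false := by simpa using ha
      subst ha'
      simp only [accumulateFinGo, List.filter_cons, Bool.false_eq_true, if_false]
      exact ih acc budget

theorem accumulate_fin_eq (inputs_active : List Bool) (weights : List Int) (budget : Int) :
    accumulate_fin inputs_active weights budget = accumulate_fin_alt inputs_active weights budget := by
  unfold accumulate_fin accumulate_fin_alt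
  rw [accumulateFinGo_closed]
  simp

-- ===== VERDICT (by name: the statement is the Claim_ definition above) =====
theorem accumulate_fin_spec : Claim_equal_accumulate_fin := by
  intro ia ws b _
  unfold Spec_accumulate_fin
  exact accumulate_fin_eq ia ws b
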